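-- pv_equiv track=rewrite | github.com/shinelotto/shinelotto.github.io | blueprints/dlt_bp.py | calculate_same_tail_groups
-- ===== SOURCE A (Python) =====
-- def calculate_same_tail_groups(front_balls):
--     """计算同尾组合 - 与前端JS逻辑保持一致"""
--     if not front_balls or len(front_balls) < 2:
--         return "无同尾"
--
--     # 计算尾数
--     tails = [ball % 10 for ball in front_balls]
--
--     # 按尾数分组
--     tail_groups = {}
--     for i, tail in enumerate(tails):
--         if tail not in tail_groups:
--             tail_groups[tail] = []
--         tail_groups[tail].append(front_balls[i])
--
--     # 筛选有重复尾数的组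
--     same_tail_groups = [group for group in tail_groups.values() if len(group) >= 2]
--
--     # 转换为同尾类型描述
--     same_tail_types = []
--     for group in same_tail_groups:
--         if len(group) == 2:
--             same_tail_types.append('2同尾')
--         elif len(group) == 3:
--             same_tail_types.append('3同尾')
--         elif len(group) == 4:
--             same_tail_types.append('4同尾')
--
--     same_tail_types.sort()
--     return '+'.join(same_tail_types) if same_tail_types else '无同尾'
-- ===== SOURCE B (Python) =====
-- _RUN_LABELS = {2: '2同尾', 3: '3同尾', 4: '4同尾'}
--
--
-- def calculate_same_tail_groups(front_balls):
--     """Sort the tails, then one run-length scan over the sorted list."""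
--     if len(front_balls) < 2:
--         return "无同尾"
--     tails = sorted(ball % 10 for ball in front_balls)
--     labels = []
--     run = 1
--     for prev, cur in zip(tails, tails[1:]):
--         if cur == prev:
--             run += 1
--         else:
--             lab = _RUN_LABELS.get(run)
--             if lab is not None:
--                 labels.append(lab)
--             run = 1
--     lab = _RUN_LABELS.get(run)
--     if lab is not None:
--         labels.append(lab)
--     labels.sort()
--     return '+'.join(labels) if labels else '无同尾'
-- ===== Notes on version B (the rewrite author's own statement) =====
-- stated objective: alternative
-- what changed: Replaces A's dict-of-lists grouping (hash-group then map group sizes) with a sort-then-scan algorithm: the tails are sorted and a single run-length scan over the sorted list emits a label per completed run of length 2-4.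
import Mathlib
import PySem

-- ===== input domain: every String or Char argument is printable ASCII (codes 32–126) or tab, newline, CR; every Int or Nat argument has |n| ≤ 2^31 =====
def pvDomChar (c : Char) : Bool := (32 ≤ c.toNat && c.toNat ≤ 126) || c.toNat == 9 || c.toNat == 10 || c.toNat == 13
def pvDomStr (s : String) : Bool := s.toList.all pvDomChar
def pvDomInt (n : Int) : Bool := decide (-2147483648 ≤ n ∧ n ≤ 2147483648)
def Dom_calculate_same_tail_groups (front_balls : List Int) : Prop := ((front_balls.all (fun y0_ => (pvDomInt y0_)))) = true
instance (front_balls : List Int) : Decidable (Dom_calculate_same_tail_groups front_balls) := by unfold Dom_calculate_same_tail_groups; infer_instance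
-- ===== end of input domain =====

-- B replaces A's dict-of-lists grouping with sort-then-scan: sort the tails, then one
-- run-length scan over the sorted list emits a label per run of length 2..4 (objective: alternative).


-- ===== PORT A =====
def calculate_same_tail_groups (front_balls : List Int) : String :=
  if front_balls.isEmpty || decide (front_balls.length < 2) then "无同尾"
  else
    let tails := front_balls.map (fun ball => PySem.Int.mod ball 10)
    -- for i, tail in enumerate(tails): if tail not in tail_groups: [] ; append front_balls[i]
    -- (front_balls[i]: i comes from enumerate, so it is always in range and pyGetD's default is never used)
    let tail_groups := (tails.zipIdx).foldl
      (fun d p =>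
        let d1 := if d.contains p.1 then d else d.insert p.1 ([] : List Int)
        d1.modify p.1 [] (fun g => g ++ [PySem.List.pyGetD front_balls (p.2 : Int) 0]))
      PySem.Dict.empty
    let same_tail_groups := tail_groups.values.filter (fun g => decide (2 ≤ g.length))
    let same_tail_types := same_tail_groups.foldl
      (fun acc g =>
        if g.length = 2 then acc ++ ["2同尾"]
        else if g.length = 3 then acc ++ ["3同尾"]
        else if g.length = 4 then acc ++ ["4同尾"]
        else acc) []
    let same_tail_types := PySem.List.sorted same_tail_types (fun x => x)
    if same_tail_types.isEmpty then "无同尾" else PySem.Str.join "+" same_tail_types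

-- ===== PORT B =====
-- _RUN_LABELS = {2: '2同尾', 3: '3同尾', 4: '4同尾'}
def pvRunLabels : PySem.Dict Int String :=
  PySem.Dict.ofList [(2, "2同尾"), (3, "3同尾"), (4, "4同尾")]

def calculate_same_tail_groups_alt (front_balls : List Int) : String :=
  if front_balls.length < 2 then "无同尾"
  else
    let tails := PySem.List.sorted (front_balls.map (fun ball => PySem.Int.mod ball 10)) (fun x => x)
    -- for prev, cur in zip(tails, tails[1:]):  (tails[1:] = tails.drop 1, in range so slice = drop)
    let st := (tails.zip (tails.drop 1)).foldl
      (fun (st : List String × Int) p =>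
        if p.2 == p.1 then (st.1, st.2 + 1)
        else
          (match pvRunLabels.get? st.2 with
           | some lab => st.1 ++ [lab]
           | none => st.1, 1))
      ([], (1 : Int))
    let labels :=
      match pvRunLabels.get? st.2 with
      | some lab => st.1 ++ [lab]
      | none => st.1
    let labels := PySem.List.sorted labels (fun x => x)
    if labels.isEmpty then "无同尾" else PySem.Str.join "+" labels

-- ===== PRECONDITION & SPEC =====
def Spec_calculate_same_tail_groups (front_balls : List Int) (out : String) : Prop := out = calculate_same_tail_groups_alt front_balls
instance (front_balls : List Int) (out : String) : Decidable (Spec_calculate_same_tail_groups front_balls out) := by unfold Spec_calculate_same_tail_groups; infer_instance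

-- ===== CLAIM (what is proved, stated in full; the proofs are below) =====
def Claim_equal_calculate_same_tail_groups : Prop := ∀ (front_balls : List Int), Dom_calculate_same_tail_groups front_balls → Spec_calculate_same_tail_groups front_balls (calculate_same_tail_groups front_balls)

-- ===== LEMMAS AND PROOFS =====

-- the tail of a ball, as A and B both compute it
def pvTail (b : Int) : Int := PySem.Int.mod b 10

-- the label a finished group/run of size n contributes (none for sizes 1 and ≥ 5)
def pvLabOf (n : Nat) : Option String :=
  if n = 2 then some "2同尾" else if n = 3 then some "3同尾" else if n = 4 then some "4同尾" else none

-- B's scan step, named (definitionally the lambda in the port)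
def pvStepB (st : List String × Int) (p : Int × Int) : List String × Int :=
  if p.2 == p.1 then (st.1, st.2 + 1)
  else
    (match pvRunLabels.get? st.2 with
     | some lab => st.1 ++ [lab]
     | none => st.1, 1)

-- B's final flush, named
def pvFlush (st : List String × Int) : List String :=
  match pvRunLabels.get? st.2 with
  | some lab => st.1 ++ [lab]
  | none => st.1

-- the dict lookup on a natural run length is pvLabOf
theorem pvFlush_eq (acc : List String) (k : Nat) :
    pvFlush (acc, ((k : Int))) = acc ++ (pvLabOf k).toList := by
  by_cases h2 : k = 2
  · subst h2
    have h : pvRunLabels.get? ((2 : Nat) : Int) = some "2同尾" := by decide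
    simp only [pvFlush]
    rw [h]
    simp [pvLabOf]
  by_cases h3 : k = 3
  · subst h3
    have h : pvRunLabels.get? ((3 : Nat) : Int) = some "3同尾" := by decide
    simp only [pvFlush]
    rw [h]
    simp [pvLabOf]
  by_cases h4 : k = 4
  · subst h4
    have h : pvRunLabels.get? ((4 : Nat) : Int) = some "4同尾" := by decide
    simp only [pvFlush]
    rw [h]
    simp [pvLabOf]
  have e2 : ((2 : Int) == (k : Int)) = false := by simp; omega
  have e3 : ((3 : Int) == (k : Int)) = false := by simp; omega
  have e4 : ((4 : Int) == (k : Int)) = false := by simp; omega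
  have hd : pvRunLabels = PySem.Dict.mk [(2, "2同尾"), (3, "3同尾"), (4, "4同尾")] := by decide
  have h : pvRunLabels.get? ((k : Nat) : Int) = none := by
    rw [hd]; simp [PySem.Dict.get?, e2, e3, e4]
  simp [pvFlush, h, pvLabOf, h2, h3, h4]

-- === A-side lemmas (dict grouping characterised) ===

-- A's grouping step is exactly a modify-append (the explicit `insert t []` is redundant)
theorem pvStep_eq (d : PySem.Dict Int (List Int)) (t b : Int) :
    ((if d.contains t then d else d.insert t ([] : List Int)).modify t [] (fun g => g ++ [b]))
      = d.modify t [] (fun g => g ++ [b]) := by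
  by_cases h : d.contains t
  · simp [h]
  · have hg : d.getD t [] = [] := PySem.Dict.getD_of_not_contains d [] (by simpa using h)
    simp only [h, Bool.false_eq_true, if_false, PySem.Dict.modify,
      PySem.Dict.getD_insert_self, PySem.Dict.insert_insert_self, hg]

-- folding over enumerate(tails) with front_balls[i] is folding over the balls themselves
theorem pvFoldl_zipIdx_get {S : Type} (g : S → Int → Int → S) (f : Int → Int) (balls : List Int) :
    ∀ (suf pre : List Int) (s : S), balls = pre ++ suf →
      ((suf.map f).zipIdx pre.length).foldl
          (fun s p => g s p.1 (PySem.List.pyGetD balls (p.2 : Int) 0)) s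
        = suf.foldl (fun s b => g s (f b) b) s := by
  intro suf
  induction suf with
  | nil => intro pre s _; rfl
  | cons b rest ih =>
    intro pre s hb
    have hget : balls.getD pre.length 0 = b := by
      subst hb
      rw [List.getD_eq_getElem _ _ (by simp)]
      simp
    simp only [List.map_cons, List.zipIdx_cons, List.foldl_cons,
      PySem.List.pyGetD_natCast, hget]
    have := ih (pre ++ [b]) (g s (f b) b) (by simp [hb])
    simpa using this

-- the values of A's grouping dict, characterised
theorem pvValues_char (balls : List Int) :
    (((balls.map pvTail).zipIdx).foldl
        (fun d p =>
          let d1 := if d.contains p.1 then d else d.insert p.1 ([] : List Int)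
          d1.modify p.1 [] (fun g => g ++ [PySem.List.pyGetD balls (p.2 : Int) 0]))
        PySem.Dict.empty).values
      = (PySem.List.dedup (balls.map pvTail)).map
          (fun t => balls.filter (fun b => pvTail b == t)) := by
  have h1 : (((balls.map pvTail).zipIdx).foldl
        (fun d p =>
          let d1 := if d.contains p.1 then d else d.insert p.1 ([] : List Int)
          d1.modify p.1 [] (fun g => g ++ [PySem.List.pyGetD balls (p.2 : Int) 0]))
        PySem.Dict.empty)
      = balls.foldl (fun d b => d.modify (pvTail b) [] (fun g => g ++ [b])) PySem.Dict.empty := by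
    have := pvFoldl_zipIdx_get
      (fun d t v => (if d.contains t then d else d.insert t ([] : List Int)).modify t [] (fun g => g ++ [v]))
      pvTail balls balls [] PySem.Dict.empty rfl
    simp only [List.length_nil] at this
    rw [this]
    exact PySem.List.foldl_congr_mem _ _ _ _ (fun d b _ => pvStep_eq d (pvTail b) b)
  rw [h1]
  set D := balls.foldl (fun d b => d.modify (pvTail b) [] (fun g => g ++ [b])) PySem.Dict.empty with hD
  have hnd : D.keys.Nodup := by
    apply PySem.Dict.nodup_keys_foldl_modify_key
    exact PySem.Dict.nodup_keys_empty
  have hkeys : D.keys = PySem.List.dedup (balls.map pvTail) := by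
    rw [hD, PySem.Dict.keys_foldl_modify_key balls pvTail [] (fun _ b => (· ++ [b]))]
    simp [PySem.Dict.keys_empty, PySem.Set.update, PySem.Set.ofList, PySem.List.dedup, PySem.Set.empty]
  have hgetD : ∀ c, D.getD c [] = balls.filter (fun b => pvTail b == c) := by
    intro c
    have h2 := PySem.Dict.getD_foldl_modify_append (balls.map (fun b => (pvTail b, b)))
      PySem.Dict.empty c
    rw [List.foldl_map] at h2
    simp only [PySem.Dict.getD_empty, List.nil_append, List.filter_map, List.map_map] at h2
    rw [hD]
    simpa [Function.comp_def] using h2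
  rw [PySem.Dict.values_eq_map_keys D hnd [], hkeys]
  exact List.map_congr_left (fun t _ => hgetD t)

-- A's label-collecting loop over the size-≥2 groups is a filterMap by pvLabOf
theorem pvLabels_fold (gs : List (List Int)) (acc : List String) :
    (gs.filter (fun g => decide (2 ≤ g.length))).foldl
        (fun acc g =>
          if g.length = 2 then acc ++ ["2同尾"]
          else if g.length = 3 then acc ++ ["3同尾"]
          else if g.length = 4 then acc ++ ["4同尾"]
          else acc) acc
      = acc ++ gs.filterMap (fun g => pvLabOf g.length) := by
  induction gs generalizing acc with
  | nil => simp
  | cons g rest ih =>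
    by_cases h2 : g.length = 2
    · simp [h2, pvLabOf, ih]
    · by_cases h3 : g.length = 3
      · simp [h3, pvLabOf, ih]
      · by_cases h4 : g.length = 4
        · simp [h4, pvLabOf, ih, show (2 : Nat) ≤ 4 by omega]
        · by_cases hge : 2 ≤ g.length
          · simp [pvLabOf, h2, h3, h4, hge, ih]
          · simp [pvLabOf, h2, h3, h4, hge, ih]

-- === B-side lemmas (run-length scan over a sorted list characterised) ===

-- adding an already-present element later is a no-op for the dedup fold
theorem pvFoldlAdd_filter (p : Int) : ∀ (L s : List Int), p ∈ s →
    L.foldl PySem.Set.add s = (L.filter (fun x => !(x == p))).foldl PySem.Set.add s := by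
  intro L
  induction L with
  | nil => intro s _; rfl
  | cons x L' ih =>
    intro s hp
    by_cases hx : (x == p) = true
    · have hxp : x = p := eq_of_beq hx
      subst hxp
      have hadd : PySem.Set.add s x = s := by
        simp [PySem.Set.add, hp]
      simp only [List.filter_cons, hx, Bool.not_true, List.foldl_cons, hadd]
      exact ih s hp
    · have hmem : p ∈ PySem.Set.add s x := by
        simp only [PySem.Set.add]
        split
        · exact hp
        · exact List.mem_append_left _ hp
      simp only [List.filter_cons, eq_false_of_ne_true hx, Bool.not_false, List.foldl_cons]
      exact ih _ hmem

-- the fold commutes with an untouched head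
theorem pvFoldlAdd_cons (p : Int) : ∀ (M s : List Int), (∀ x ∈ M, (x == p) = false) →
    M.foldl PySem.Set.add (p :: s) = p :: M.foldl PySem.Set.add s := by
  intro M
  induction M with
  | nil => intro s _; rfl
  | cons x M' ih =>
    intro s hM
    have hx : (x == p) = false := hM x (List.mem_cons_self)
    have hxp : ¬ x = p := by simpa using hx
    have hc : PySem.Set.contains (p :: s) x = PySem.Set.contains s x := by
      simp [PySem.Set.contains, hxp]
    have hadd : PySem.Set.add (p :: s) x = p :: PySem.Set.add s x := by
      simp only [PySem.Set.add, hc]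
      split <;> rfl
    simp only [List.foldl_cons, hadd]
    exact ih _ (fun y hy => hM y (List.mem_cons_of_mem _ hy))

-- first-occurrence dedup of a cons
theorem pvDedup_cons (p : Int) (L : List Int) :
    PySem.List.dedup (p :: L) = p :: PySem.List.dedup (L.filter (fun x => !(x == p))) := by
  have hofl : ∀ (M : List Int), PySem.List.dedup M = M.foldl PySem.Set.add [] := by
    intro M
    rw [PySem.List.dedup_eq_ofList, PySem.Set.ofList_eq_foldl]
  rw [hofl, hofl]
  have h0 : PySem.Set.add ([] : List Int) p = [p] := by simp [PySem.Set.add]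
  rw [List.foldl_cons, h0, pvFoldlAdd_filter p L [p] (List.mem_singleton.mpr rfl)]
  exact pvFoldlAdd_cons p _ [] (fun x hx => by
    have := List.of_mem_filter hx
    simpa using this)

-- peeling the first distinct value off the filterMap over the dedup
theorem pvChunk (p : Int) (L : List Int) :
    (PySem.List.dedup (p :: L)).filterMap (fun t => pvLabOf ((p :: L).count t))
      = (pvLabOf (1 + L.count p)).toList
          ++ (PySem.List.dedup (L.filter (fun x => !(x == p)))).filterMap
               (fun t => pvLabOf (L.count t)) := by
  rw [pvDedup_cons, List.filterMap_cons]
  have hcnt : (p :: L).count p = 1 + L.count p := by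
    rw [List.count_cons_self]; omega
  have htail : (PySem.List.dedup (L.filter (fun x => !(x == p)))).filterMap
        (fun t => pvLabOf ((p :: L).count t))
      = (PySem.List.dedup (L.filter (fun x => !(x == p)))).filterMap
        (fun t => pvLabOf (L.count t)) := by
    apply List.filterMap_congr
    intro t ht
    have htf : t ∈ L.filter (fun x => !(x == p)) := (PySem.List.mem_dedup _ _).mp ht
    have htp : (t == p) = false := by
      have := List.of_mem_filter htf
      simpa using this
    have htp' : (p == t) = false := by
      have : ¬ t = p := by simpa using htp
      simp [Ne.symm this]
    simp [List.count_cons, htp']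
  rw [hcnt, htail]
  cases pvLabOf (1 + L.count p) <;> simp

-- the else branch of the scan step flushes the finished run
theorem pvStepB_false (st : List String × Int) (q : Int × Int) (h : (q.2 == q.1) = false) :
    pvStepB st q = (pvFlush st, 1) := by
  simp [pvStepB, pvFlush, h]

-- the run-length scan over a sorted (pairwise-≤) list collects pvLabOf of every value's multiplicity
theorem pvRun_aux (L : List Int) : ∀ (p : Int) (k : Nat) (acc : List String),
    List.Pairwise (· ≤ ·) (p :: L) →
    pvFlush (((p :: L).zip L).foldl pvStepB (acc, ((k + 1 : Nat) : Int)))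
      = acc ++ (pvLabOf (k + 1 + L.count p)).toList
          ++ (PySem.List.dedup (L.filter (fun x => !(x == p)))).filterMap
               (fun t => pvLabOf (L.count t)) := by
  induction L with
  | nil =>
    intro p k acc _
    simp only [List.zip_nil_right, List.foldl_nil, pvFlush_eq, List.count_nil,
      Nat.add_zero, List.filter_nil]
    simp [PySem.List.dedup_eq_ofList, PySem.Set.ofList]
  | cons c L' ih =>
    intro p k acc hpw
    have hPL : List.Pairwise (· ≤ ·) (c :: L') := hpw.of_cons
    have hpc : p ≤ c := (List.pairwise_cons.mp hpw).1 c List.mem_cons_self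
    rw [List.zip_cons_cons, List.foldl_cons]
    by_cases hbe : (c == p) = true
    · have hcp : c = p := eq_of_beq hbe
      subst hcp
      have hc2 : ((k + 1 + 1 : Nat) : Int) = ((k + 1 : Nat) : Int) + 1 := by push_cast; ring
      have hstep : pvStepB (acc, ((k + 1 : Nat) : Int)) (c, c)
          = (acc, ((k + 1 + 1 : Nat) : Int)) := by
        simp [pvStepB, hc2]
      rw [hstep, ih c (k + 1) acc hPL]
      have hcnt : List.count c (c :: L') = List.count c L' + 1 := by simp
      have hfil : (c :: L').filter (fun x => !(x == c)) = L'.filter (fun x => !(x == c)) := by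
        simp
      have htail : (PySem.List.dedup (L'.filter (fun x => !(x == c)))).filterMap
            (fun t => pvLabOf (List.count t (c :: L')))
          = (PySem.List.dedup (L'.filter (fun x => !(x == c)))).filterMap
            (fun t => pvLabOf (List.count t L')) := by
        apply List.filterMap_congr
        intro t ht
        have htf := List.of_mem_filter ((PySem.List.mem_dedup _ _).mp ht)
        have htc : ¬ t = c := by simpa using htf
        have hct : (c == t) = false := by simp [Ne.symm htc]
        simp [List.count_cons, hct]
      rw [hcnt, hfil, htail]
      have harith : k + 1 + 1 + List.count c L' = k + 1 + (List.count c L' + 1) := by omega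
      rw [harith]
    · have hbe' : (c == p) = false := eq_false_of_ne_true hbe
      have hcp : c ≠ p := fun h => hbe (beq_iff_eq.mpr h)
      have hplt : p < c := lt_of_le_of_ne hpc (Ne.symm hcp)
      have hnotin : ∀ x ∈ c :: L', (x == p) = false := by
        intro x hx
        rcases List.mem_cons.mp hx with h | h
        · subst h; exact hbe'
        · have : c ≤ x := (List.pairwise_cons.mp hPL).1 x h
          have : p ≠ x := by omega
          simp [Ne.symm this]
      rw [pvStepB_false _ _ (by simpa using hbe'), pvFlush_eq]
      have h1 : (1 : Int) = ((0 + 1 : Nat) : Int) := by norm_num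
      rw [h1, ih c 0 (acc ++ (pvLabOf (k + 1)).toList) hPL]
      have hcnt0 : (c :: L').count p = 0 := by
        rw [List.count_eq_zero]
        intro hmem
        exact absurd (hnotin p hmem) (by simp)
      have hfil : (c :: L').filter (fun x => !(x == p)) = c :: L' := by
        apply List.filter_eq_self.mpr
        intro x hx
        simp [hnotin x hx]
      rw [hcnt0, hfil, pvChunk c L']
      simp [List.append_assoc]

-- B's collected labels are a permutation-invariant description: pvLabOf of each tail's count
theorem pvScan_char (T : List Int) (hT : List.Pairwise (· ≤ ·) T) (hne : T ≠ []) :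
    pvFlush ((T.zip (T.drop 1)).foldl pvStepB ([], (1 : Int)))
      = (PySem.List.dedup T).filterMap (fun t => pvLabOf (T.count t)) := by
  cases T with
  | nil => exact absurd rfl hne
  | cons p L =>
    have h1 : (1 : Int) = ((0 + 1 : Nat) : Int) := by norm_num
    have hdrop : (p :: L).drop 1 = L := rfl
    rw [hdrop, h1, pvRun_aux L p 0 [] hT, pvChunk p L]
    simp

-- ===== VERDICT (by name: the statement is the Claim_ definition above) =====
theorem calculate_same_tail_groups_spec : Claim_equal_calculate_same_tail_groups := by
  intro balls _
  unfold Spec_calculate_same_tail_groups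
  unfold calculate_same_tail_groups calculate_same_tail_groups_alt
  by_cases hlen : balls.length < 2
  · simp [hlen]
  · have hA : (balls.isEmpty || decide (balls.length < 2)) = false := by
      simp only [Bool.or_eq_false_iff, List.isEmpty_eq_false_iff, decide_eq_false_iff_not]
      exact ⟨by rintro rfl; exact hlen (by simp), hlen⟩
    rw [if_neg (by rw [hA]; simp), if_neg hlen]
    simp only [show (fun ball => PySem.Int.mod ball 10) = pvTail from rfl,
      pvValues_char balls, pvLabels_fold, List.nil_append, List.filterMap_map]
    -- B side: name the sorted tails and characterise the scan
    set tails := balls.map pvTail with htails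
    set T := PySem.List.sorted tails (fun x => x) with hT
    have hTperm : T.Perm tails := PySem.List.sorted_perm tails (fun x => x) false
    have hTpw : List.Pairwise (· ≤ ·) T := PySem.List.sorted_pairwise tails (fun x => x)
    have hbne : balls ≠ [] := by
      intro h
      rw [h] at hlen
      simp at hlen
    have hTne : T ≠ [] := by
      rw [hT, Ne, PySem.List.sorted_eq_nil_iff, htails]
      simpa using hbne
    have hscan := pvScan_char T hTpw hTne
    rw [show (fun (st : List String × Int) (p : Int × Int) =>
          if p.2 == p.1 then (st.1, st.2 + 1)
          else (match pvRunLabels.get? st.2 with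
                | some lab => st.1 ++ [lab]
                | none => st.1, (1 : Int))) = pvStepB from rfl]
    set st := List.foldl pvStepB ([], (1 : Int)) (T.zip (T.drop 1)) with hst
    rw [show (match pvRunLabels.get? st.2 with
              | some lab => st.1 ++ [lab]
              | none => st.1) = pvFlush st from rfl]
    rw [hst, hscan]
    -- both sorted lists are sorts of permuted label lists: rewrite B's to A's
    have hAeq : (PySem.List.dedup tails).filterMap (fun t => pvLabOf (List.count t tails))
        = (PySem.List.dedup tails).filterMap
            ((fun g => pvLabOf g.length) ∘ fun t => balls.filter (fun b => pvTail b == t)) := by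
      apply List.filterMap_congr
      intro t _
      have h1 : List.count t tails = balls.countP (fun b => pvTail b == t) := by
        rw [htails]
        simp only [List.count, List.countP_map]
        apply List.countP_congr
        intro b _
        simp [Function.comp]
      rw [h1, Function.comp_apply, List.countP_eq_length_filter]
    have hBeq : (fun t => pvLabOf (List.count t T)) = fun t => pvLabOf (List.count t tails) := by
      funext t
      rw [List.Perm.count_eq hTperm]
    have hdperm : (PySem.List.dedup T).Perm (PySem.List.dedup tails) := by
      rw [List.perm_ext_iff_of_nodup (PySem.List.nodup_dedup _) (PySem.List.nodup_dedup _)]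
      intro a
      simp [hTperm.mem_iff]
    have hperm2 : ((PySem.List.dedup T).filterMap (fun t => pvLabOf (List.count t T))).Perm
        ((PySem.List.dedup tails).filterMap
          ((fun g => pvLabOf g.length) ∘ fun t => balls.filter (fun b => pvTail b == t))) := by
      rw [hBeq, ← hAeq]
      exact hdperm.filterMap _
    rw [PySem.List.sorted_eq_sorted_of_perm _ _ (fun x => x) (fun a b h => h) hperm2]
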